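-- pv_equiv track=rewrite | github.com/rayaniruddho/Python-programs | closest_power.py | closest_power
-- ===== SOURCE A (Python) =====
-- def closest_power(base, num):
--     '''
--     base: base of the exponential, integer > 1
--     num: number you want to be closest to, integer > 0
--     Find the integer exponent such that base**exponent is closest to num.
--     Note that the base**exponent may be either greater or smaller than num.
--     In case of a tie, return the smaller value.
--     Returns the exponent.
--     '''
--     exp=0
--     ans=[]
--     i=0
--     power=base**exp
--     ans.append(abs(power-num))
--     exp+=1
--     power=base**exp
--     ans.append(abs(power-num))
--     exp+=1
--     while ans[i+1]<ans[i]: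
--         i+=1
--         power=base**exp
--         ans.append(abs(power-num))
--         exp+=1
--     return exp-2
-- ===== SOURCE B (Python) =====
-- def closest_power(base, num):
--     # Bracketing: grow a running power until it reaches num, then pick between
--     # the two bracketing exponents (tie -> smaller exponent).
--     power, exp, prev = 1, 0, 0
--     while power < num:
--         prev, power, exp = power, power * base, exp + 1
--     if exp and power - num >= num - prev:
--         return exp - 1
--     return exp
-- ===== Notes on version B (the rewrite author's own statement) =====
-- stated objective: alternative
-- what changed: B replaces A's scan that recomputes base**exp from scratch and stores every |power-num| in a growing list with a single running-product loop that brackets num and then compares only the two bracketing powers.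
-- outside the precondition, e.g. on closest_power(1, 5): A returns 0, B does not finish within the time limit; on closest_power(-2, -5): A returns 1, B returns 0
import Mathlib
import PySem

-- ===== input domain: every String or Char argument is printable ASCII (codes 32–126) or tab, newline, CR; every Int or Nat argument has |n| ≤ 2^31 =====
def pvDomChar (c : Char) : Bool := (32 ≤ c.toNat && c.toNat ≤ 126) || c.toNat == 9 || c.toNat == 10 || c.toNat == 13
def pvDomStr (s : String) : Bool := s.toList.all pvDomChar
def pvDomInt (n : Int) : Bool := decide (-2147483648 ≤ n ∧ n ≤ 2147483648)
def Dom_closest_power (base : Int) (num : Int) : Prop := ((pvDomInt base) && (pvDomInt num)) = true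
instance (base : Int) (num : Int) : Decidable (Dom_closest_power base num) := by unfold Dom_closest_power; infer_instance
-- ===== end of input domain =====

-- B replaces A's list-building scan (which recomputes base**exp each step) with a running-product
-- bracketing loop comparing only the two powers around num; equivalence proved for base > 1.


-- ===== PORT A =====
-- A's while-loop: ans holds abs(base**j - num) for j = 0..exp-1 (abs values are nonneg, kept as Nat;
-- equal as integers), i is the scan index, exp = ans.length; the in-range proof h mirrors the fact
-- that Python's ans[i+1]/ans[i] never raise here.
def closest_powerLoopA (base num : Int) (exp : Nat) (i : Nat) (ans : List Nat)
    (h : i + 1 < ans.length) : Int :=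
  if hlt : ans[i+1] < ans[i]'(Nat.lt_of_succ_lt h) then
    closest_powerLoopA base num (exp+1) (i+1) (ans ++ [(base ^ exp - num).natAbs])
      (by simp only [List.length_append, List.length_cons, List.length_nil]; omega)
  else (exp : Int) - 2
termination_by ans.getD i 0
decreasing_by
  have h1 : i + 1 < ans.length := h
  simp [Nat.lt_of_succ_lt h1, h1]
  simpa [List.getD_eq_getElem, h1, Nat.lt_of_succ_lt h1] using hlt

def closest_power (base : Int) (num : Int) : Int :=
  -- exp=0; power=base**0; append; exp=1; power=base**1; append; exp=2; then the while loop
  closest_powerLoopA base num 2 0 [(base ^ 0 - num).natAbs, (base ^ 1 - num).natAbs] (by simp)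

-- ===== PORT B =====
-- B's while-loop; the fuel argument is a totality guard only: it strictly exceeds the number of
-- loop iterations whenever Python B's loop terminates (|power| at least doubles each step).
def closest_powerLoopB (base num power : Int) (exp : Nat) (prev : Int) : Nat → Int
  | 0 => 0
  | fuel + 1 =>
    if power < num then
      closest_powerLoopB base num (power * base) (exp + 1) power fuel
    else if exp ≠ 0 ∧ power - num ≥ num - prev then (exp : Int) - 1 else (exp : Int)

def closest_power_alt (base : Int) (num : Int) : Int :=
  closest_powerLoopB base num 1 0 0 (num.natAbs + 2)

-- ===== PRECONDITION & SPEC =====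
-- Pre_ restricts to the documented domain "base: integer > 1" (A's docstring); A still returns a
-- value for base ≤ 1, but B's natural loop need not terminate there, so those inputs are excluded.
def Pre_closest_power (base : Int) (num : Int) : Prop := 1 < base
instance (base : Int) (num : Int) : Decidable (Pre_closest_power base num) := by
  unfold Pre_closest_power; infer_instance
def pvWitness_closest_power : Int × Int := (2, 10)

def Spec_closest_power (base : Int) (num : Int) (out : Int) : Prop := out = closest_power_alt base num
instance (base : Int) (num : Int) (out : Int) : Decidable (Spec_closest_power base num out) := by
  unfold Spec_closest_power; infer_instance

-- ===== CLAIM (what is proved, stated in full; the proofs are below) =====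
def Claim_equal_closest_power : Prop := ∀ (base : Int) (num : Int), Dom_closest_power base num → Pre_closest_power base num → Spec_closest_power base num (closest_power base num)

-- ===== LEMMAS AND PROOFS =====

lemma closest_power_terminal (base num : Int) (hb : 1 < base) (i : Nat) (prev : Int)
    (ans : List Nat) (h : i + 1 < ans.length)
    (hans : ∀ j (hj : j < ans.length), ans[j] = (base ^ j - num).natAbs)
    (hp : 0 < base ^ i) (fuel : Nat) (hf : (num - base ^ i).toNat < fuel)
    (hinv : i = 0 ∨ (base ^ (i-1) < num ∧
      (base ^ i - num).natAbs < (num - base ^ (i-1)).natAbs ∧ prev = base ^ (i-1)))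
    (hnlt : ¬ base ^ i < num) :
    closest_powerLoopA base num (i+2) i ans h =
      closest_powerLoopB base num (base ^ i) i prev fuel := by
  obtain ⟨f, rfl⟩ : ∃ f, fuel = f + 1 := ⟨fuel - 1, by omega⟩
  have hq : base ^ i < base ^ (i+1) := by
    have hs : base ^ (i+1) = base ^ i * base := pow_succ base i
    nlinarith
  have e1 : ans[i+1] = (base ^ (i+1) - num).natAbs := hans (i+1) h
  have e0 : ans[i]'(Nat.lt_of_succ_lt h) = (base ^ i - num).natAbs :=
    hans i (Nat.lt_of_succ_lt h)
  have hgv : ¬ ans[i+1] < ans[i]'(Nat.lt_of_succ_lt h) := by rw [e1, e0]; omega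
  rw [closest_powerLoopA, dif_neg hgv, closest_powerLoopB, if_neg hnlt]
  rcases hinv with hi0 | ⟨hprevlt, habs, hprev⟩
  · subst hi0
    rw [if_neg (by simp)]
    norm_num
  · rw [if_neg ?_]
    · push_cast; omega
    · rintro ⟨hi, hcond⟩
      rw [hprev] at hcond
      omega

lemma closest_power_key (base num : Int) (hb : 1 < base) :
    ∀ (K i : Nat) (prev : Int) (ans : List Nat) (h : i + 1 < ans.length)
      (hans : ∀ j (hj : j < ans.length), ans[j] = (base ^ j - num).natAbs)
      (hlen : ans.length = i + 2) (hp : 0 < base ^ i) (fuel : Nat)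
      (hf : (num - base ^ i).toNat < fuel)
      (hinv : i = 0 ∨ (base ^ (i-1) < num ∧
        (base ^ i - num).natAbs < (num - base ^ (i-1)).natAbs ∧ prev = base ^ (i-1)))
      (hK : (num - base ^ i).toNat ≤ K),
      closest_powerLoopA base num (i+2) i ans h = closest_powerLoopB base num (base ^ i) i prev fuel := by
  intro K
  induction K with
  | zero =>
    intro i prev ans h hans _hlen hp fuel hf hinv hK
    have hnlt : ¬ base ^ i < num := by omega
    exact closest_power_terminal base num hb i prev ans h hans hp fuel hf hinv hnlt
  | succ K ih =>
    intro i prev ans h hans hlen hp fuel hf hinv hK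
    by_cases hlt : base ^ i < num
    · have hq : base ^ i < base ^ (i+1) := by
        have hs : base ^ (i+1) = base ^ i * base := pow_succ base i
        nlinarith
      have e1 : ans[i+1] = (base ^ (i+1) - num).natAbs := hans (i+1) h
      have e0 : ans[i]'(Nat.lt_of_succ_lt h) = (base ^ i - num).natAbs :=
        hans i (Nat.lt_of_succ_lt h)
      have hp' : (0:Int) < base ^ (i+1) := pow_pos (by omega) _
      have hans' : ∀ j (hj : j < (ans ++ [(base ^ (i+2) - num).natAbs]).length),
          (ans ++ [(base ^ (i+2) - num).natAbs])[j] = (base ^ j - num).natAbs := by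
        intro j hj
        by_cases hj2 : j < ans.length
        · rw [List.getElem_append_left hj2]; exact hans j hj2
        · have hje : j = ans.length := by simp at hj; omega
          subst hje
          simp [hlen]
      have hlen' : (ans ++ [(base ^ (i+2) - num).natAbs]).length = (i+1) + 2 := by
        simp [hlen]
      obtain ⟨f, rfl⟩ : ∃ f, fuel = f + 1 := ⟨fuel - 1, by omega⟩
      by_cases hg : (base ^ (i+1) - num).natAbs < (base ^ i - num).natAbs
      · have hgv : ans[i+1] < ans[i]'(Nat.lt_of_succ_lt h) := by rw [e1, e0]; exact hg
        rw [closest_powerLoopA, dif_pos hgv, closest_powerLoopB, if_pos hlt]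
        have hK' : (num - base ^ (i+1)).toNat ≤ K := by omega
        have hf' : (num - base ^ (i+1)).toNat < f := by omega
        have hinv' : (i+1) = 0 ∨ (base ^ ((i+1)-1) < num ∧
            (base ^ (i+1) - num).natAbs < (num - base ^ ((i+1)-1)).natAbs ∧
            (base ^ i : Int) = base ^ ((i+1)-1)) := by
          refine Or.inr ⟨by simpa using hlt, ?_, by simp⟩
          simp only [Nat.add_sub_cancel]
          omega
        have := ih (i+1) (base ^ i) (ans ++ [(base ^ (i+2) - num).natAbs])
          (by simp [hlen]) hans' hlen' hp' f hf' hinv' hK'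
        rw [show base ^ i * base = base ^ (i+1) from (pow_succ base i).symm]
        exact this
      · have hge2 : num ≤ base ^ (i+1) := by omega
        have hgv : ¬ ans[i+1] < ans[i]'(Nat.lt_of_succ_lt h) := by rw [e1, e0]; exact hg
        obtain ⟨g, rfl⟩ : ∃ g, f = g + 1 := ⟨f - 1, by omega⟩
        rw [closest_powerLoopA, dif_neg hgv, closest_powerLoopB, if_pos hlt,
            closest_powerLoopB]
        rw [if_neg (by rw [show base ^ i * base = base ^ (i+1) from (pow_succ base i).symm]; omega)]
        rw [if_pos ?_]
        · push_cast; omega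
        · refine ⟨by omega, ?_⟩
          rw [show base ^ i * base = base ^ (i+1) from (pow_succ base i).symm]
          omega
    · exact closest_power_terminal base num hb i prev ans h hans hp fuel hf hinv hlt

-- ===== VERDICT (by name: the statement is the Claim_ definition above) =====
theorem closest_power_spec : Claim_equal_closest_power := by
  intro base num _hdom hpre
  unfold Spec_closest_power closest_power closest_power_alt
  have h0 : (0:Int) < base ^ 0 := by norm_num
  have := closest_power_key base num hpre ((num - 1).toNat) 0 0
      [(base ^ 0 - num).natAbs, (base ^ 1 - num).natAbs] (by simp)
      (by intro j hj
          simp at hj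
          interval_cases j <;> simp)
      (by simp) h0 (num.natAbs + 2) (by rw [pow_zero]; omega) (Or.inl rfl) (by simp)
  simpa using this
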